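-- pv_equiv track=rewrite | github.com/OCA/l10n-spain | l10n_es_payment_order_confirming_caixabank/models/account_payment_order.py | _get_signed_amount
-- ===== SOURCE A (Python) =====
-- def _get_signed_amount(amount_text):
--     """
--     Añade el signo al importe negativo
--     """
--     sign_text = ''
--     for i in range(0, len(amount_text)):
--         if i < (len(amount_text) - 1) and \
--                 amount_text[i] == '0' and \
--                 amount_text[i + 1] != '0':
--             sign_text += '-'
--             continue
--         sign_text += amount_text[i]
--     return sign_text
-- ===== SOURCE B (Python) =====
-- def _get_signed_amount(amount_text):
--     """
--     Añade el signo al importe negativo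
--     """
--     # Run-length strategy: the loop's rule marks exactly the last '0' of every
--     # maximal run of zeros that does not end the string, so scan run by run.
--     out = []
--     i, n = 0, len(amount_text)
--     while i < n:
--         j = i
--         while j < n and amount_text[j] == amount_text[i]:
--             j += 1
--         if amount_text[i] == '0' and j < n:
--             out.append('0' * (j - i - 1) + '-')
--         else:
--             out.append(amount_text[i] * (j - i))
--         i = j
--     return ''.join(out)
-- ===== Notes on version B (the rewrite author's own statement) =====
-- stated objective: alternative
-- what changed: Replaced the per-index character loop with string concatenation by a run-length scan: B walks maximal runs of equal characters and emits each run at once, turning the last zero of every non-final zero run into the minus sign, joining the pieces once.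
import Mathlib
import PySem

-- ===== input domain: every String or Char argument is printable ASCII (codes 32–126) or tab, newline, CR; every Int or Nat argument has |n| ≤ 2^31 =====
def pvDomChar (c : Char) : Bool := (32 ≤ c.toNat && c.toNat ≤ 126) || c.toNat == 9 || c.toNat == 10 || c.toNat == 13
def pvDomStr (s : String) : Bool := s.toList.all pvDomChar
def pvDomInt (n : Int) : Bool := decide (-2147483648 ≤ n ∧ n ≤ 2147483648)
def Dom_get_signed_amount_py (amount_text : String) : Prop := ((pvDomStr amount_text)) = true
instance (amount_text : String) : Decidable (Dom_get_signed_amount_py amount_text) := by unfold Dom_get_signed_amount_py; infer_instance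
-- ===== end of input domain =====

-- B replaces A's per-index loop with a run-length scan over maximal runs of equal characters (alternative algorithm, same result).

-- ===== PORT A =====
def get_signed_amount_py (amount_text : String) : String :=
  let l := amount_text.toList
  let n : Int := l.length
  let sign := (PySem.List.pyRange 0 n 1).foldl (fun acc i =>
    if i < n - 1 ∧ PySem.List.pyGetD l i ' ' = '0' ∧ PySem.List.pyGetD l (i + 1) ' ' ≠ '0'
    then acc ++ ['-']
    else acc ++ [PySem.List.pyGetD l i ' ']) []
  String.mk sign

-- ===== PORT B =====
-- outer while loop over runs: each step consumes one maximal run (inner while = takeWhile/dropWhile)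
def pvRunGo : List Char → List Char
  | [] => []
  | c :: rest =>
    let t := rest.takeWhile (fun x => x = c)   -- rest of the current run (inner while)
    let d := rest.dropWhile (fun x => x = c)   -- remaining text after the run
    (if c = '0' ∧ d ≠ [] then List.replicate t.length '0' ++ ['-']
     else List.replicate (t.length + 1) c) ++ pvRunGo d
  termination_by l => l.length
  decreasing_by
    simp only [List.length_cons]
    exact Nat.lt_succ_of_le (List.dropWhile_sublist (l := rest) (p := fun x => x = c)).length_le

def get_signed_amount_py_alt (amount_text : String) : String :=
  String.mk (pvRunGo amount_text.toList)

-- ===== PRECONDITION & SPEC =====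
def Spec_get_signed_amount_py (amount_text : String) (out : String) : Prop := out = get_signed_amount_py_alt amount_text
instance (amount_text : String) (out : String) : Decidable (Spec_get_signed_amount_py amount_text out) := by unfold Spec_get_signed_amount_py; infer_instance

-- ===== CLAIM (what is proved, stated in full; the proofs are below) =====
def Claim_equal_get_signed_amount_py : Prop := ∀ (amount_text : String), Dom_get_signed_amount_py amount_text → Spec_get_signed_amount_py amount_text (get_signed_amount_py amount_text)

-- ===== LEMMAS AND PROOFS =====

-- pairwise recursion, the common reference form of both programs
def pvPair : List Char → List Char
  | [] => []
  | [c] => [c]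
  | a :: b :: rest => (if a = '0' ∧ b ≠ '0' then '-' else a) :: pvPair (b :: rest)

-- A's indexed foldl equals the zip-with-tail map plus the last character
theorem pv_A_zip (l : List Char) :
    (PySem.List.pyRange 0 (l.length : Int) 1).foldl (fun acc i =>
      if i < (l.length : Int) - 1 ∧ PySem.List.pyGetD l i ' ' = '0' ∧
          PySem.List.pyGetD l (i + 1) ' ' ≠ '0'
      then acc ++ ['-']
      else acc ++ [PySem.List.pyGetD l i ' ']) [] =
    (l.zip l.tail).map (fun p => if p.1 = '0' ∧ p.2 ≠ '0' then '-' else p.1) ++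
      l.drop (l.length - 1) := by
  have hfun : (fun (acc : List Char) (i : Int) =>
      if i < (l.length : Int) - 1 ∧ PySem.List.pyGetD l i ' ' = '0' ∧
          PySem.List.pyGetD l (i + 1) ' ' ≠ '0'
      then acc ++ ['-']
      else acc ++ [PySem.List.pyGetD l i ' ']) =
      (fun acc i => acc ++ [if i < (l.length : Int) - 1 ∧ PySem.List.pyGetD l i ' ' = '0' ∧
          PySem.List.pyGetD l (i + 1) ' ' ≠ '0' then '-' else PySem.List.pyGetD l i ' ']) := by
    funext acc i
    split <;> rfl
  rw [hfun]
  rw [PySem.List.foldl_append_singleton_eq_map]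
  rw [PySem.List.pyRange_zero_natCast]
  rw [List.map_map]
  simp only [List.nil_append]
  apply List.ext_getElem
  · simp [List.length_zip]
  · intro k hk1 hk2
    simp only [List.length_map, List.length_range] at hk1
    rw [List.getElem_map, List.getElem_range]
    by_cases hlast : k < l.length - 1
    · rw [List.getElem_append_left (by simp [List.length_zip]; omega)]
      rw [List.getElem_map, List.getElem_zip, List.getElem_tail]
      have hc : ((k : Int) < (l.length : Int) - 1) := by omega
      have h1 : PySem.List.pyGetD l (k : Int) ' ' = l[k] := by
        rw [PySem.List.pyGetD_natCast, List.getD_eq_getElem _ _ hk1]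
      have h2 : PySem.List.pyGetD l ((k : Int) + 1) ' ' = l[k + 1] := by
        have : (k : Int) + 1 = ((k + 1 : Nat) : Int) := by push_cast; ring
        rw [this, PySem.List.pyGetD_natCast, List.getD_eq_getElem _ _ (by omega)]
      simp only [Function.comp, h1, h2, hc, true_and]
    · have hk' : k = l.length - 1 := by omega
      rw [List.getElem_append_right (by simp [List.length_zip]; omega)]
      have h1 : PySem.List.pyGetD l (k : Int) ' ' = l[k] := by
        rw [PySem.List.pyGetD_natCast, List.getD_eq_getElem _ _ hk1]
      have hc : ¬ ((k : Int) < (l.length : Int) - 1) := by omega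
      simp only [Function.comp, h1, hc, false_and, if_false]
      rw [List.getElem_drop]
      congr 1
      simp [List.length_zip]
      omega

-- the zip-with-tail map plus last char is the pairwise recursion pvPair
theorem pv_zip_pair (l : List Char) :
    (l.zip l.tail).map (fun p => if p.1 = '0' ∧ p.2 ≠ '0' then '-' else p.1) ++
      l.drop (l.length - 1) = pvPair l := by
  match l with
  | [] => rfl
  | [c] => rfl
  | a :: b :: rest =>
    have ih := pv_zip_pair (b :: rest)
    simp only [pvPair, List.tail_cons, List.zip_cons_cons, List.map_cons, List.cons_append,
      List.length_cons] at ih ⊢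
    rw [show (rest.length + 1 + 1 - 1) = rest.length + 1 from rfl, List.drop_succ_cons]
    rw [show (rest.length + 1 - 1) = rest.length from rfl] at ih
    rw [ih]

-- pvPair over one maximal run of c followed by d whose head differs from c
theorem pv_pair_run (k : Nat) (c : Char) (d : List Char)
    (hd : ∀ e ∈ d.head?, e ≠ c) :
    pvPair (List.replicate (k + 1) c ++ d) =
      (if c = '0' ∧ d ≠ [] then List.replicate k '0' ++ ['-']
       else List.replicate (k + 1) c) ++ pvPair d := by
  induction k with
  | zero =>
    match d with
    | [] => simp [pvPair]
    | e :: d' =>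
      have he : e ≠ c := hd e rfl
      by_cases hc : c = '0'
      · subst hc
        simp [pvPair, he]
      · simp [pvPair, hc]
  | succ k ih =>
    have h2 : List.replicate (k + 1 + 1) c ++ d = c :: c :: (List.replicate k c ++ d) := by
      simp [List.replicate_succ]
    rw [h2]
    have h3 : (c :: (List.replicate k c ++ d)) = List.replicate (k + 1) c ++ d := by
      simp [List.replicate_succ]
    have hpp : pvPair (c :: c :: (List.replicate k c ++ d)) =
        c :: pvPair (c :: (List.replicate k c ++ d)) := by
      simp [pvPair]
    rw [hpp, h3, ih]
    by_cases hc : c = '0' <;> by_cases hdn : d = [] <;>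
      simp [hc, hdn, List.replicate_succ]

-- B's run scan equals the pairwise recursion
theorem pv_run_pair (l : List Char) : pvRunGo l = pvPair l := by
  induction l using pvRunGo.induct with
  | case1 => rw [pvRunGo]; rfl
  | case2 c rest x ih =>
    rw [pvRunGo]
    have hsplit : rest = rest.takeWhile (fun x => x = c) ++ rest.dropWhile (fun x => x = c) :=
      (List.takeWhile_append_dropWhile).symm
    have ht : rest.takeWhile (fun x => x = c) =
        List.replicate (rest.takeWhile (fun x => x = c)).length c := by
      rw [List.eq_replicate_iff]
      refine ⟨rfl, ?_⟩
      intro x hx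
      have := List.mem_takeWhile_imp hx
      simpa using this
    have hhead : ∀ e ∈ (rest.dropWhile (fun x => x = c)).head?, e ≠ c := by
      intro e he
      have := List.head?_dropWhile_not (p := fun x => x = c) (l := rest)
      rcases h : (rest.dropWhile (fun x => x = c)).head? with _ | e'
      · simp [h] at he
      · rw [h] at he this
        simp at he this
        subst he
        exact this
    have hcl : c :: rest =
        List.replicate ((rest.takeWhile (fun x => x = c)).length + 1) c ++
          rest.dropWhile (fun x => x = c) := by
      conv_lhs => rw [hsplit]
      rw [List.replicate_succ]
      simp only [List.cons_append]
      congr 1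
      conv_lhs => rw [ht]
    conv_rhs => rw [hcl]
    rw [pv_pair_run _ _ _ hhead, ih]

-- ===== VERDICT (by name: the statement is the Claim_ definition above) =====
theorem get_signed_amount_py_spec : Claim_equal_get_signed_amount_py := by
  intro s _
  unfold Spec_get_signed_amount_py get_signed_amount_py get_signed_amount_py_alt
  simp only
  rw [pv_A_zip s.toList, pv_zip_pair s.toList, pv_run_pair s.toList]
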